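-- pv_equiv track=rewrite | github.com/power-sc/Uncovering-Power-SC25 | src/week_power_wait.py | get_hour_block
-- ===== SOURCE A (Python) =====
-- def get_hour_block(hour):
--     blocks = [
--         (0, 3, "00-03"), (3, 6, "03-06"), (6, 9, "06-09"), (9, 12, "09-12"),
--         (12, 15, "12-15"), (15, 18, "15-18"), (18, 21, "18-21"), (21, 24, "21-24"),
--     ]
--     for start, end, label in blocks:
--         if start <= hour < end:
--             return label
--     return "Unknown"
-- ===== SOURCE B (Python) =====
-- def get_hour_block(hour):
--     if 0 <= hour < 24:
--         i = int(hour // 3)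
--         return f"{i*3:02d}-{(i+1)*3:02d}"
--     return "Unknown"
-- ===== Notes on version B (the rewrite author's own statement) =====
-- stated objective: simpler
-- what changed: Replaced the linear scan over a list of (start, end, label) ranges by a closed-form computation: range-check the hour, then compute its block index by floor division and format the zero-padded label directly.
import Mathlib
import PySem

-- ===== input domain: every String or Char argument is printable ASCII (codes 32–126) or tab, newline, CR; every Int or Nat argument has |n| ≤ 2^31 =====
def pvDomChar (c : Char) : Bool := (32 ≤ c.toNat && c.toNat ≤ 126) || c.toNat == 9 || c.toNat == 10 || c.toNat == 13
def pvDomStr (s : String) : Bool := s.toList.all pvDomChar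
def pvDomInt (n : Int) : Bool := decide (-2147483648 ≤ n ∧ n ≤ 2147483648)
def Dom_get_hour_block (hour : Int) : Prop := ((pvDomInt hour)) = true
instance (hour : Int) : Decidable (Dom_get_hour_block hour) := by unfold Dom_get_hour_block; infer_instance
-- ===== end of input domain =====

-- B replaces A's scan over a range list by a closed-form index computation; objective: simpler.

-- ===== PORT A =====
-- first-match scan over the blocks list, exactly as A's for-loop
def pvLoopA (hour : Int) : List (Int × Int × String) → String
  | [] => "Unknown"
  | (s, e, l) :: rest => if s ≤ hour ∧ hour < e then l else pvLoopA hour rest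

def get_hour_block (hour : Int) : String :=
  let blocks : List (Int × Int × String) :=
    [(0, 3, "00-03"), (3, 6, "03-06"), (6, 9, "06-09"), (9, 12, "09-12"),
     (12, 15, "12-15"), (15, 18, "15-18"), (18, 21, "18-21"), (21, 24, "21-24")]
  pvLoopA hour blocks

-- ===== PORT B =====
-- f"{n:02d}" for nonnegative n
def pvPad2 (n : Int) : String :=
  if n < 10 then "0" ++ PySem.Int.toStr n else PySem.Int.toStr n

def get_hour_block_alt (hour : Int) : String :=
  if 0 ≤ hour ∧ hour < 24 then
    let i := PySem.Int.floordiv hour 3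
    pvPad2 (i * 3) ++ "-" ++ pvPad2 ((i + 1) * 3)
  else "Unknown"

-- ===== PRECONDITION & SPEC =====
def Spec_get_hour_block (hour : Int) (out : String) : Prop := out = get_hour_block_alt hour
instance (hour : Int) (out : String) : Decidable (Spec_get_hour_block hour out) := by unfold Spec_get_hour_block; infer_instance

-- ===== CLAIM (what is proved, stated in full; the proofs are below) =====
def Claim_equal_get_hour_block : Prop := ∀ (hour : Int), Dom_get_hour_block hour → Spec_get_hour_block hour (get_hour_block hour)

-- ===== LEMMAS AND PROOFS =====

-- ===== VERDICT (by name: the statement is the Claim_ definition above) =====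
theorem get_hour_block_spec : Claim_equal_get_hour_block := by
  intro hour _
  unfold Spec_get_hour_block
  by_cases h : 0 ≤ hour ∧ hour < 24
  · obtain ⟨h0, h24⟩ := h
    interval_cases hour <;> decide
  · simp only [get_hour_block, get_hour_block_alt, pvLoopA, if_neg h]
    split_ifs with h1 h2 h3 h4 h5 h6 h7 h8 <;> first | rfl | (exact absurd ⟨by omega, by omega⟩ h)
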